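-- pv_equiv track=rewrite | github.com/CyrusSE/CTF-Writeups | CCP/Warmup/rasa.py | count
-- ===== SOURCE A (Python) =====
-- def count(N: int, M: int, X: int) -> int:
--     count = 0
--     for i1 in range(N):
--         for j1 in range(M):
--             for di in range(-X, X + 1):
--                 i2 = i1 + di
--                 if i2 < 0 or i2 >= N:
--                     continue
--                 rem = X - abs(di)
--                 if rem < 0:
--                     continue
--                 j2_pos = j1 + rem
--                 if j2_pos < M:
--                     count += 1
--                 j2_neg = j1 - rem
--                 if rem != 0 and j2_neg >= 0:
--                     count += 1
--
--     return count // 2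
-- ===== SOURCE B (Python) =====
-- def count(N: int, M: int, X: int) -> int:
--     total = 0
--     lo = max(0, X - M + 1)
--     hi = min(X, N - 1)
--     for d in range(lo, hi + 1):
--         rows = N - d
--         rem = X - d
--         cols = M - rem
--         term = rows * cols * (2 if rem != 0 else 1)
--         total += term * (2 if d != 0 else 1)
--     return total // 2
-- ===== Notes on version B (the rewrite author's own statement) =====
-- stated objective: faster
-- what changed: Replaced the triple loop over all cells and offsets by a single loop over the row offset d=0..X, counting positions in closed form: max(0,N-d) row pairs times max(0,M-rem) column pairs, doubled for nonzero d and nonzero rem.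
import Mathlib
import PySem

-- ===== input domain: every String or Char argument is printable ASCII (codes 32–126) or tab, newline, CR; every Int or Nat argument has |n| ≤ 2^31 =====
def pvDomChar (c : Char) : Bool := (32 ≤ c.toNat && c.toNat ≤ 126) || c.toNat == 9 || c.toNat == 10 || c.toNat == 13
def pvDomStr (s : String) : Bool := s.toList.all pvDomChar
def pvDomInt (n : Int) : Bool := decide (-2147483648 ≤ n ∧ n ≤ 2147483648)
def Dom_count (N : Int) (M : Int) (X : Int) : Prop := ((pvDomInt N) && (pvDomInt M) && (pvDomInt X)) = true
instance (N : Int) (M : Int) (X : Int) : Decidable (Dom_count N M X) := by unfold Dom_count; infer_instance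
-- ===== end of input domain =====

-- B replaces A's O(N*M*X) triple loop by a single O(X) loop over the row offset with
-- closed-form position counts per offset; equal return value on all inputs (objective: faster).

-- ===== PORT A =====
def count (N : Int) (M : Int) (X : Int) : Int :=
  let c :=
    (PySem.List.pyRange 0 N 1).foldl (fun c i1 =>
      (PySem.List.pyRange 0 M 1).foldl (fun c j1 =>
        (PySem.List.pyRange (-X) (X + 1) 1).foldl (fun c di =>
          let i2 := i1 + di
          if i2 < 0 ∨ N ≤ i2 then c
          else
            let rem := X - |di|
            if rem < 0 then c
            else
              let j2pos := j1 + rem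
              let c := if j2pos < M then c + 1 else c
              let j2neg := j1 - rem
              if rem ≠ 0 ∧ 0 ≤ j2neg then c + 1 else c) c) c) 0
  PySem.Int.floordiv c 2

-- ===== PORT B =====
def count_alt (N : Int) (M : Int) (X : Int) : Int :=
  let lo := max 0 (X - M + 1)
  let hi := min X (N - 1)
  let total :=
    (PySem.List.pyRange lo (hi + 1) 1).foldl (fun total d =>
      let rows := N - d
      let rem := X - d
      let cols := M - rem
      let term := rows * cols * (if rem ≠ 0 then 2 else 1)
      total + term * (if d ≠ 0 then 2 else 1)) 0
  PySem.Int.floordiv total 2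

-- ===== PRECONDITION & SPEC =====
def Spec_count (N : Int) (M : Int) (X : Int) (out : Int) : Prop := out = count_alt N M X
instance (N : Int) (M : Int) (X : Int) (out : Int) : Decidable (Spec_count N M X out) := by unfold Spec_count; infer_instance

-- ===== CLAIM (what is proved, stated in full; the proofs are below) =====
def Claim_equal_count : Prop := ∀ (N : Int) (M : Int) (X : Int), Dom_count N M X → Spec_count N M X (count N M X)

-- ===== LEMMAS AND PROOFS =====

-- the per-offset contribution of A's innermost loop body
def gA (N M X i1 j1 di : Int) : Int :=
  if i1 + di < 0 ∨ N ≤ i1 + di then 0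
  else if X - |di| < 0 then 0
  else (if j1 + (X - |di|) < M then 1 else 0) + (if X - |di| ≠ 0 ∧ 0 ≤ j1 - (X - |di|) then 1 else 0)

-- closed-form value of the inner double sum, as a function of d = |di| (for d in range)
def GG (N M X d : Int) : Int :=
  max 0 (N - d) * (max 0 (M - (X - d)) + if X - d ≠ 0 then max 0 (M - (X - d)) else 0)

-- counting 0/1-indicators over range(n)
theorem sumInd (n : Nat) (lo hi : Int) :
    ((List.range n).map (fun (k : Nat) => if lo ≤ (k : Int) ∧ (k : Int) < hi then (1 : Int) else 0)).sum
      = max 0 (min (n : Int) hi - max 0 lo) := by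
  induction n with
  | zero => simp only [List.range_zero, List.map_nil, List.sum_nil, Nat.cast_zero]; omega
  | succ n ih =>
    rw [List.range_succ, List.map_append, List.sum_append, ih]
    simp only [List.map_cons, List.map_nil, List.sum_cons, List.sum_nil]
    split_ifs with h <;> push_cast <;> omega

theorem sum_ind_pyRange (K lo hi : Int) :
    ((PySem.List.pyRange 0 K 1).map (fun x => if lo ≤ x ∧ x < hi then (1 : Int) else 0)).sum
      = max 0 (min K hi - max 0 lo) := by
  rw [PySem.List.pyRange_one, List.map_map]
  simp only [Function.comp_def, zero_add]
  rw [sumInd (K - 0).toNat lo hi]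
  omega

-- sums over two nested lists commute
theorem sum_comm_list (l1 l2 : List Int) (f : Int → Int → Int) :
    (l1.map (fun a => (l2.map (f a)).sum)).sum
      = (l2.map (fun b => (l1.map (fun a => f a b)).sum)).sum := by
  induction l1 with
  | nil => simp
  | cons a t ih =>
    simp only [List.map_cons, List.sum_cons, ih]
    rw [← PySem.List.sum_map_add_int]

-- the row-indicator sum in closed form
theorem isum (N di : Int) :
    ((PySem.List.pyRange 0 N 1).map (fun i1 => if 0 ≤ i1 + di ∧ i1 + di < N then (1 : Int) else 0)).sum
      = max 0 (N - |di|) := by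
  have hcongr : ((PySem.List.pyRange 0 N 1).map (fun i1 => if 0 ≤ i1 + di ∧ i1 + di < N then (1 : Int) else 0))
      = ((PySem.List.pyRange 0 N 1).map (fun i1 => if -di ≤ i1 ∧ i1 < N - di then (1 : Int) else 0)) := by
    apply List.map_congr_left; intro x _
    split_ifs <;> omega
  rw [hcongr, sum_ind_pyRange]
  by_cases h : 0 ≤ di
  · rw [abs_of_nonneg h]; omega
  · rw [abs_of_neg (by omega)]; omega

-- the column part of A's innermost body, summed over j1, in closed form (for 0 ≤ rem)
theorem jsum (M rem : Int) (hrem : 0 ≤ rem) :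
    ((PySem.List.pyRange 0 M 1).map (fun j1 =>
        (if j1 + rem < M then (1 : Int) else 0) + (if rem ≠ 0 ∧ 0 ≤ j1 - rem then 1 else 0))).sum
      = max 0 (M - rem) + (if rem ≠ 0 then max 0 (M - rem) else 0) := by
  rw [PySem.List.sum_map_add_int]
  have e1 : ((PySem.List.pyRange 0 M 1).map (fun j1 => if j1 + rem < M then (1 : Int) else 0)).sum
      = max 0 (M - rem) := by
    have h1 : ((PySem.List.pyRange 0 M 1).map (fun j1 => if j1 + rem < M then (1 : Int) else 0))
        = ((PySem.List.pyRange 0 M 1).map (fun j1 => if 0 ≤ j1 ∧ j1 < M - rem then (1 : Int) else 0)) := by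
      apply List.map_congr_left; intro x hx
      rw [PySem.List.mem_pyRange_one] at hx
      split_ifs <;> omega
    rw [h1, sum_ind_pyRange]; omega
  have e2 : ((PySem.List.pyRange 0 M 1).map (fun j1 => if rem ≠ 0 ∧ 0 ≤ j1 - rem then (1 : Int) else 0)).sum
      = if rem ≠ 0 then max 0 (M - rem) else 0 := by
    by_cases h0 : rem = 0
    · simp [h0]
    · have h2 : ((PySem.List.pyRange 0 M 1).map (fun j1 => if rem ≠ 0 ∧ 0 ≤ j1 - rem then (1 : Int) else 0))
          = ((PySem.List.pyRange 0 M 1).map (fun j1 => if rem ≤ j1 ∧ j1 < M then (1 : Int) else 0)) := by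
        apply List.map_congr_left; intro x hx
        rw [PySem.List.mem_pyRange_one] at hx
        split_ifs <;> omega
      rw [h2, sum_ind_pyRange, if_pos h0]; omega
  rw [e1, e2]

-- A's inner double sum collapses to GG |di| for di in the offset range
theorem double_sum (N M X di : Int) (h1 : -X ≤ di) (h2 : di < X + 1) :
    ((PySem.List.pyRange 0 N 1).map (fun i1 =>
        ((PySem.List.pyRange 0 M 1).map (fun j1 => gA N M X i1 j1 di)).sum)).sum
      = GG N M X |di| := by
  have habs : |di| ≤ X := abs_le.mpr ⟨h1, by omega⟩
  have hrem : 0 ≤ X - |di| := by omega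
  have hsplit : ∀ i1 j1 : Int, gA N M X i1 j1 di
      = (if 0 ≤ i1 + di ∧ i1 + di < N then (1 : Int) else 0)
        * ((if j1 + (X - |di|) < M then (1 : Int) else 0) + (if X - |di| ≠ 0 ∧ 0 ≤ j1 - (X - |di|) then 1 else 0)) := by
    intro i1 j1
    unfold gA
    split_ifs <;> omega
  calc ((PySem.List.pyRange 0 N 1).map (fun i1 =>
        ((PySem.List.pyRange 0 M 1).map (fun j1 => gA N M X i1 j1 di)).sum)).sum
      = ((PySem.List.pyRange 0 N 1).map (fun i1 =>
        (if 0 ≤ i1 + di ∧ i1 + di < N then (1 : Int) else 0)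
          * ((PySem.List.pyRange 0 M 1).map (fun j1 =>
              (if j1 + (X - |di|) < M then (1 : Int) else 0)
                + (if X - |di| ≠ 0 ∧ 0 ≤ j1 - (X - |di|) then 1 else 0))).sum)).sum := by
        apply congrArg; apply List.map_congr_left; intro i1 _
        rw [← List.sum_map_mul_left]
        apply congrArg; apply List.map_congr_left; intro j1 _
        exact hsplit i1 j1
    _ = ((PySem.List.pyRange 0 N 1).map (fun i1 =>
          (if 0 ≤ i1 + di ∧ i1 + di < N then (1 : Int) else 0))).sum
          * ((PySem.List.pyRange 0 M 1).map (fun j1 =>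
              (if j1 + (X - |di|) < M then (1 : Int) else 0)
                + (if X - |di| ≠ 0 ∧ 0 ≤ j1 - (X - |di|) then 1 else 0))).sum := by
        rw [← List.sum_map_mul_right]
    _ = GG N M X |di| := by
        rw [isum, jsum M (X - |di|) hrem]; unfold GG; rfl

-- the negative half of the offset range, mapped through |·|, is the reversed positive half
theorem neg_part (G : Int → Int) (X : Int) (hX : 0 ≤ X) :
    (PySem.List.pyRange (-X) 0 1).map (fun di => G |di|)
      = ((PySem.List.pyRange 1 (X + 1) 1).map G).reverse := by
  have hlen1 : ((PySem.List.pyRange (-X) 0 1).map (fun di => G |di|)).length = X.toNat := by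
    simp [PySem.List.length_pyRange_one]
  have hlen2 : (((PySem.List.pyRange 1 (X + 1) 1).map G).reverse).length = X.toNat := by
    simp [PySem.List.length_pyRange_one]
  apply List.ext_getElem (by rw [hlen1, hlen2])
  intro i hi1 hi2
  rw [hlen1] at hi1
  simp only [List.getElem_map, List.getElem_reverse, List.length_map,
    PySem.List.length_pyRange_one]
  rw [PySem.List.getElem_pyRange_one, PySem.List.getElem_pyRange_one]
  have hiX : (i : Int) < X := by omega
  rw [abs_of_nonpos (by omega)]
  congr 1
  have h1 : ((X + 1 - 1).toNat - 1 - i : Nat) = X.toNat - 1 - i := by omega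
  rw [h1]
  omega

-- A's triple fold, written as a sum of gA
theorem countA_sum (N M X : Int) :
    count N M X
      = PySem.Int.floordiv
          (((PySem.List.pyRange 0 N 1).map (fun i1 =>
              ((PySem.List.pyRange 0 M 1).map (fun j1 =>
                ((PySem.List.pyRange (-X) (X + 1) 1).map (fun di => gA N M X i1 j1 di)).sum)).sum)).sum) 2 := by
  unfold count
  show PySem.Int.floordiv
      ((PySem.List.pyRange 0 N 1).foldl (fun c i1 =>
        (PySem.List.pyRange 0 M 1).foldl (fun c j1 =>
          (PySem.List.pyRange (-X) (X + 1) 1).foldl (fun c di =>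
            if i1 + di < 0 ∨ N ≤ i1 + di then c
            else
              if X - |di| < 0 then c
              else
                if X - |di| ≠ 0 ∧ 0 ≤ j1 - (X - |di|) then
                  (if j1 + (X - |di|) < M then c + 1 else c) + 1
                else (if j1 + (X - |di|) < M then c + 1 else c)) c) c) 0) 2 = _
  congr 1
  have hinner : ∀ (i1 j1 c0 : Int),
      (PySem.List.pyRange (-X) (X + 1) 1).foldl (fun c di =>
          if i1 + di < 0 ∨ N ≤ i1 + di then c
          else
            if X - |di| < 0 then c
            else
              if X - |di| ≠ 0 ∧ 0 ≤ j1 - (X - |di|) then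
                (if j1 + (X - |di|) < M then c + 1 else c) + 1
              else (if j1 + (X - |di|) < M then c + 1 else c)) c0
        = c0 + ((PySem.List.pyRange (-X) (X + 1) 1).map (fun di => gA N M X i1 j1 di)).sum := by
    intro i1 j1 c0
    rw [← PySem.List.foldl_add _ (fun di => gA N M X i1 j1 di)]
    apply PySem.List.foldl_congr_mem
    intro c di _hdi
    unfold gA
    split_ifs <;> omega
  have hmid : ∀ (c0 : Int),
      (PySem.List.pyRange 0 N 1).foldl (fun c i1 =>
        (PySem.List.pyRange 0 M 1).foldl (fun c j1 =>
          (PySem.List.pyRange (-X) (X + 1) 1).foldl (fun c di =>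
            if i1 + di < 0 ∨ N ≤ i1 + di then c
            else
              if X - |di| < 0 then c
              else
                if X - |di| ≠ 0 ∧ 0 ≤ j1 - (X - |di|) then
                  (if j1 + (X - |di|) < M then c + 1 else c) + 1
                else (if j1 + (X - |di|) < M then c + 1 else c)) c) c) c0
      = (PySem.List.pyRange 0 N 1).foldl (fun c i1 =>
          c + ((PySem.List.pyRange 0 M 1).map (fun j1 =>
            ((PySem.List.pyRange (-X) (X + 1) 1).map (fun di => gA N M X i1 j1 di)).sum)).sum) c0 := by
    intro c0
    apply PySem.List.foldl_congr_mem
    intro c i1 _h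
    rw [show (fun c j1 =>
        (PySem.List.pyRange (-X) (X + 1) 1).foldl (fun c di =>
          if i1 + di < 0 ∨ N ≤ i1 + di then c
          else
            if X - |di| < 0 then c
            else
              if X - |di| ≠ 0 ∧ 0 ≤ j1 - (X - |di|) then
                (if j1 + (X - |di|) < M then c + 1 else c) + 1
              else (if j1 + (X - |di|) < M then c + 1 else c)) c)
      = (fun c j1 => c + ((PySem.List.pyRange (-X) (X + 1) 1).map (fun di => gA N M X i1 j1 di)).sum)
      from funext fun c => funext fun j1 => hinner i1 j1 c]
    rw [PySem.List.foldl_add]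
  rw [hmid 0, PySem.List.foldl_add]
  simp

-- B's fold, written as a sum of GG-terms
theorem countB_sum (N M X : Int) :
    count_alt N M X
      = PySem.Int.floordiv
          (((PySem.List.pyRange (max 0 (X - M + 1)) (min X (N - 1) + 1) 1).map (fun d =>
              (N - d) * (M - (X - d)) * (if X - d ≠ 0 then 2 else 1) * (if d ≠ 0 then 2 else 1))).sum) 2 := by
  unfold count_alt
  show PySem.Int.floordiv
      ((PySem.List.pyRange (max 0 (X - M + 1)) (min X (N - 1) + 1) 1).foldl (fun total d =>
        total + (N - d) * (M - (X - d)) * (if X - d ≠ 0 then 2 else 1)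
          * (if d ≠ 0 then 2 else 1)) 0) 2 = _
  congr 1
  rw [PySem.List.foldl_add, zero_add]

-- a GG-term vanishes outside the clamped offset window
theorem GG_zero (N M X d : Int) (hd0 : 0 ≤ d) (hdX : d ≤ X)
    (h : d < max 0 (X - M + 1) ∨ min X (N - 1) < d) : GG N M X d = 0 := by
  unfold GG
  rcases h with h | h
  · have hc : max 0 (M - (X - d)) = 0 := by omega
    rw [hc]
    split_ifs <;> ring
  · have hr : max 0 (N - d) = 0 := by omega
    rw [hr]
    ring

-- restricting the full offset sum to the clamped window drops only zero terms
theorem clamp_sum (N M X : Int) :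
    ((PySem.List.pyRange 0 (X + 1) 1).map (fun d =>
        GG N M X d * (if d ≠ 0 then 2 else 1))).sum
      = ((PySem.List.pyRange (max 0 (X - M + 1)) (min X (N - 1) + 1) 1).map (fun d =>
          (N - d) * (M - (X - d)) * (if X - d ≠ 0 then 2 else 1) * (if d ≠ 0 then 2 else 1))).sum := by
  have hmid : ((PySem.List.pyRange (max 0 (X - M + 1)) (min X (N - 1) + 1) 1).map (fun d =>
        (N - d) * (M - (X - d)) * (if X - d ≠ 0 then 2 else 1) * (if d ≠ 0 then 2 else 1)))
      = ((PySem.List.pyRange (max 0 (X - M + 1)) (min X (N - 1) + 1) 1).map (fun d =>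
        GG N M X d * (if d ≠ 0 then 2 else 1))) := by
    apply List.map_congr_left
    intro d hd
    rw [PySem.List.mem_pyRange_one] at hd
    unfold GG
    have h1 : max 0 (N - d) = N - d := by omega
    have h2 : max 0 (M - (X - d)) = M - (X - d) := by omega
    rw [h1, h2]
    split_ifs <;> ring
  rw [hmid]
  by_cases hle : max 0 (X - M + 1) ≤ min X (N - 1) + 1
  · rw [PySem.List.pyRange_one_append 0 (max 0 (X - M + 1)) (X + 1) (by omega) (by omega),
        PySem.List.pyRange_one_append (max 0 (X - M + 1)) (min X (N - 1) + 1) (X + 1) hle (by omega),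
        List.map_append, List.map_append, List.sum_append, List.sum_append]
    have hpre : ((PySem.List.pyRange 0 (max 0 (X - M + 1)) 1).map (fun d =>
        GG N M X d * (if d ≠ 0 then 2 else 1))).sum = 0 := by
      have : ((PySem.List.pyRange 0 (max 0 (X - M + 1)) 1).map (fun d =>
          GG N M X d * (if d ≠ 0 then 2 else 1)))
          = ((PySem.List.pyRange 0 (max 0 (X - M + 1)) 1).map (fun _ => (0 : Int))) := by
        apply List.map_congr_left
        intro d hd
        rw [PySem.List.mem_pyRange_one] at hd
        rw [GG_zero N M X d (by omega) (by omega) (by omega)]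
        ring
      rw [this]; simp
    have hsuf : ((PySem.List.pyRange (min X (N - 1) + 1) (X + 1) 1).map (fun d =>
        GG N M X d * (if d ≠ 0 then 2 else 1))).sum = 0 := by
      have : ((PySem.List.pyRange (min X (N - 1) + 1) (X + 1) 1).map (fun d =>
          GG N M X d * (if d ≠ 0 then 2 else 1)))
          = ((PySem.List.pyRange (min X (N - 1) + 1) (X + 1) 1).map (fun _ => (0 : Int))) := by
        apply List.map_congr_left
        intro d hd
        rw [PySem.List.mem_pyRange_one] at hd
        rw [GG_zero N M X d (by omega) (by omega) (by omega)]
        ring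
      rw [this]; simp
    rw [hpre, hsuf]
    ring
  · rw [PySem.List.pyRange_one_eq_nil (by omega : min X (N - 1) + 1 ≤ max 0 (X - M + 1))]
    have : ((PySem.List.pyRange 0 (X + 1) 1).map (fun d =>
        GG N M X d * (if d ≠ 0 then 2 else 1)))
        = ((PySem.List.pyRange 0 (X + 1) 1).map (fun _ => (0 : Int))) := by
      apply List.map_congr_left
      intro d hd
      rw [PySem.List.mem_pyRange_one] at hd
      rw [GG_zero N M X d (by omega) (by omega) (by omega)]
      ring
    rw [this]; simp

-- main equality of the two pre-division sums
theorem sums_eq (N M X : Int) :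
    ((PySem.List.pyRange 0 N 1).map (fun i1 =>
        ((PySem.List.pyRange 0 M 1).map (fun j1 =>
          ((PySem.List.pyRange (-X) (X + 1) 1).map (fun di => gA N M X i1 j1 di)).sum)).sum)).sum
      = ((PySem.List.pyRange 0 (X + 1) 1).map (fun d =>
          GG N M X d * (if d ≠ 0 then 2 else 1))).sum := by
  -- pull the di-sum outside
  have swap1 : ∀ i1 : Int,
      ((PySem.List.pyRange 0 M 1).map (fun j1 =>
        ((PySem.List.pyRange (-X) (X + 1) 1).map (fun di => gA N M X i1 j1 di)).sum)).sum
      = ((PySem.List.pyRange (-X) (X + 1) 1).map (fun di =>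
        ((PySem.List.pyRange 0 M 1).map (fun j1 => gA N M X i1 j1 di)).sum)).sum := by
    intro i1
    exact sum_comm_list _ _ (fun j1 di => gA N M X i1 j1 di)
  have step1 : ((PySem.List.pyRange 0 N 1).map (fun i1 =>
        ((PySem.List.pyRange 0 M 1).map (fun j1 =>
          ((PySem.List.pyRange (-X) (X + 1) 1).map (fun di => gA N M X i1 j1 di)).sum)).sum)).sum
      = ((PySem.List.pyRange (-X) (X + 1) 1).map (fun di =>
          ((PySem.List.pyRange 0 N 1).map (fun i1 =>
            ((PySem.List.pyRange 0 M 1).map (fun j1 => gA N M X i1 j1 di)).sum)).sum)).sum := by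
    rw [List.map_congr_left (fun i1 _ => swap1 i1)]
    exact sum_comm_list _ _ (fun i1 di =>
      ((PySem.List.pyRange 0 M 1).map (fun j1 => gA N M X i1 j1 di)).sum)
  rw [step1]
  -- collapse the inner double sum to GG |di|
  have step2 : ((PySem.List.pyRange (-X) (X + 1) 1).map (fun di =>
        ((PySem.List.pyRange 0 N 1).map (fun i1 =>
          ((PySem.List.pyRange 0 M 1).map (fun j1 => gA N M X i1 j1 di)).sum)).sum)).sum
      = ((PySem.List.pyRange (-X) (X + 1) 1).map (fun di => GG N M X |di|)).sum := by
    apply congrArg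
    apply List.map_congr_left
    intro di hdi
    rw [PySem.List.mem_pyRange_one] at hdi
    exact double_sum N M X di hdi.1 hdi.2
  rw [step2]
  by_cases hX' : X < 0
  · -- X < 0: both ranges are empty
    rw [PySem.List.pyRange_one_eq_nil (by omega : X + 1 ≤ -X),
        PySem.List.pyRange_one_eq_nil (by omega : X + 1 ≤ 0)]
    simp
  · -- X ≥ 0: split the symmetric range and fold the two halves together
    have hX : 0 ≤ X := by omega
    rw [PySem.List.pyRange_one_append (-X) 0 (X + 1) (by omega) (by omega),
        List.map_append, List.sum_append,
        neg_part (fun d => GG N M X d) X hX, List.sum_reverse]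
    have hcons0 : PySem.List.pyRange 0 (X + 1) 1 = 0 :: PySem.List.pyRange 1 (X + 1) 1 :=
      PySem.List.pyRange_one_cons (by omega)
    have hpos : (PySem.List.pyRange 0 (X + 1) 1).map (fun di => GG N M X |di|)
        = (PySem.List.pyRange 0 (X + 1) 1).map (fun di => GG N M X di) := by
      apply List.map_congr_left
      intro di hdi
      rw [PySem.List.mem_pyRange_one] at hdi
      rw [abs_of_nonneg hdi.1]
    rw [hpos, hcons0, List.map_cons, List.map_cons, List.sum_cons, List.sum_cons]
    have hdouble : (PySem.List.pyRange 1 (X + 1) 1).map (fun d => GG N M X d * (if d ≠ 0 then 2 else 1))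
        = (PySem.List.pyRange 1 (X + 1) 1).map (fun d => GG N M X d + GG N M X d) := by
      apply List.map_congr_left
      intro d hd
      rw [PySem.List.mem_pyRange_one] at hd
      have : d ≠ 0 := by omega
      simp only [this, if_true, ne_eq, not_false_iff]
      ring
    rw [hdouble, PySem.List.sum_map_add_int]
    have h0 : (if (0 : Int) ≠ 0 then (2 : Int) else 1) = 1 := by norm_num
    rw [h0]
    ring

-- ===== VERDICT (by name: the statement is the Claim_ definition above) =====
theorem count_spec : Claim_equal_count := by
  intro N M X _hdom
  unfold Spec_count
  rw [countA_sum, countB_sum, sums_eq, clamp_sum]
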